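-- pv_equiv track=rewrite | github.com/leezehuan/BitVideo-Insight | backend/video_processor.py | _pick_subtitle_format
-- ===== SOURCE A (Python) =====
-- from typing import Optional
--
-- def _pick_subtitle_format(formats: list[dict]) -> Optional[dict]:
--     if not formats:
--         return None
--     preferred_exts = ["vtt", "srt", "ttml", "srv3", "srv2", "srv1"]
--     for ext in preferred_exts:
--         for f in formats:
--             if (f.get("ext") or "").lower() == ext and f.get("url"):
--                 return f
--     for f in formats:
--         if f.get("url"):
--             return f
--     return None
-- ===== SOURCE B (Python) =====
-- from typing import Optional
--
-- def _pick_subtitle_format(formats: list[dict]) -> Optional[dict]: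
--     preferred_exts = ["vtt", "srt", "ttml", "srv3", "srv2", "srv1"]
--     best = None
--     best_rank = 7
--     for f in formats:
--         if not f.get("url"):
--             continue
--         ext = (f.get("ext") or "").lower()
--         rank = preferred_exts.index(ext) if ext in preferred_exts else 6
--         if rank < best_rank:
--             best, best_rank = f, rank
--     return best
-- ===== Notes on version B (the rewrite author's own statement) =====
-- stated objective: simpler
-- what changed: Replaces the six ordered rescans of the list plus a fallback scan with a single pass that ranks each url-bearing format by its extension's priority index and keeps the first format with the strictly lowest rank.
import Mathlib
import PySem

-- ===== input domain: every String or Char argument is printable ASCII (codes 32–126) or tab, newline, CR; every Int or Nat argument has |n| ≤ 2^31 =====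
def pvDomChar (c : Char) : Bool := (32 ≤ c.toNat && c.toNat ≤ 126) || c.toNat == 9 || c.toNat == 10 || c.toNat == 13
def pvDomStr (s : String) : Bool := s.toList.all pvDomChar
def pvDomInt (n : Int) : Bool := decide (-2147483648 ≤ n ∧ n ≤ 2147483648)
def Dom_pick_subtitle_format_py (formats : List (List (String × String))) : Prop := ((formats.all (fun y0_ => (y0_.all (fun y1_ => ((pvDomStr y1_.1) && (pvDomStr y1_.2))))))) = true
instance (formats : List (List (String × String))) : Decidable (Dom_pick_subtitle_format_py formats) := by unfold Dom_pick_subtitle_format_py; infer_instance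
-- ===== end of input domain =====

-- B replaces A's six ordered rescans plus fallback scan with one min-tracking pass over ranks (simpler, same result).

-- shared primitive: dict.get(k) on an association list (first match)
def pyGetKey (f : List (String × String)) (k : String) : Option String :=
  (f.find? (fun p => p.1 == k)).map (·.2)

-- ===== PORT A =====
-- inner 'for f in formats' of one preferred ext
def pickA_scan (e : String) : List (List (String × String)) → Option (List (String × String))
  | [] => none
  | f :: rest =>
    if (PySem.Str.lower ((pyGetKey f "ext").getD "") == e) && (((pyGetKey f "url").getD "") != "") then
      some f
    else pickA_scan e rest

-- outer 'for ext in preferred_exts'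
def pickA_exts : List String → List (List (String × String)) → Option (List (String × String))
  | [], _ => none
  | e :: es, fs =>
    match pickA_scan e fs with
    | some f => some f
    | none => pickA_exts es fs

-- final fallback 'for f in formats: if f.get("url")'
def pickA_fallback : List (List (String × String)) → Option (List (String × String))
  | [] => none
  | f :: rest => if ((pyGetKey f "url").getD "") != "" then some f else pickA_fallback rest

def pick_subtitle_format_py (formats : List (List (String × String))) : Option (List (String × String)) :=
  if formats.isEmpty then none
  else
    match pickA_exts ["vtt", "srt", "ttml", "srv3", "srv2", "srv1"] formats with
    | some f => some f
    | none => pickA_fallback formats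

-- ===== PORT B =====
-- the single min-tracking loop of Source B: state (best, best_rank)
def pickB_loop : List (List (String × String)) → Option (List (String × String)) → Nat → Option (List (String × String))
  | [], best, _ => best
  | f :: rest, best, bestRank =>
    if ((pyGetKey f "url").getD "") == "" then pickB_loop rest best bestRank
    else
      let ext := PySem.Str.lower ((pyGetKey f "ext").getD "")
      let rank := (PySem.List.index? ["vtt", "srt", "ttml", "srv3", "srv2", "srv1"] ext).getD 6
      if rank < bestRank then pickB_loop rest (some f) rank
      else pickB_loop rest best bestRank

def pick_subtitle_format_py_alt (formats : List (List (String × String))) : Option (List (String × String)) :=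
  pickB_loop formats none 7

-- ===== PRECONDITION & SPEC =====
def Spec_pick_subtitle_format_py (formats : List (List (String × String))) (out : Option (List (String × String))) : Prop := out = pick_subtitle_format_py_alt formats
instance (formats : List (List (String × String))) (out : Option (List (String × String))) : Decidable (Spec_pick_subtitle_format_py formats out) := by unfold Spec_pick_subtitle_format_py; infer_instance

-- ===== CLAIM (what is proved, stated in full; the proofs are below) =====
def Claim_equal_pick_subtitle_format_py : Prop := ∀ (formats : List (List (String × String))), Dom_pick_subtitle_format_py formats → Spec_pick_subtitle_format_py formats (pick_subtitle_format_py formats)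

-- ===== LEMMAS AND PROOFS =====

-- rank of a lowered extension string, as a chain of ifs
def erk (e : String) : Nat :=
  if e = "vtt" then 0 else if e = "srt" then 1 else if e = "ttml" then 2
  else if e = "srv3" then 3 else if e = "srv2" then 4 else if e = "srv1" then 5 else 6

-- rank of a format: 7 = no url, else rank of its extension
def rk (f : List (String × String)) : Nat :=
  if (pyGetKey f "url").getD "" = "" then 7
  else erk (PySem.Str.lower ((pyGetKey f "ext").getD ""))

-- minimum rank so far
def mrk (r : Nat) (fs : List (List (String × String))) : Nat := fs.foldl (fun a f => min a (rk f)) r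

theorem erk_le_six (e : String) : erk e ≤ 6 := by
  unfold erk; split_ifs <;> omega

theorem rk_le_seven (f : List (String × String)) : rk f ≤ 7 := by
  unfold rk; split_ifs with h
  · exact le_refl 7
  · exact Nat.le_trans (erk_le_six _) (by omega)

theorem rk_of_url (f : List (String × String)) (h : (pyGetKey f "url").getD "" ≠ "") :
    rk f = erk (PySem.Str.lower ((pyGetKey f "ext").getD "")) := by
  unfold rk; rw [if_neg h]

theorem rk_le_six_of_url (f : List (String × String)) (h : (pyGetKey f "url").getD "" ≠ "") : rk f ≤ 6 := by
  rw [rk_of_url f h]; exact erk_le_six _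

theorem idxmatch (e : String) :
    (PySem.List.index? ["vtt", "srt", "ttml", "srv3", "srv2", "srv1"] e).getD 6 = erk e := by
  unfold erk
  by_cases h0 : e = "vtt"
  · subst h0; rw [PySem.List.index?_cons_self]; simp
  · rw [PySem.List.index?_cons_of_ne _ (Ne.symm h0), if_neg h0]
    by_cases h1 : e = "srt"
    · subst h1; rw [PySem.List.index?_cons_self]; simp
    · rw [PySem.List.index?_cons_of_ne _ (Ne.symm h1), if_neg h1]
      by_cases h2 : e = "ttml"
      · subst h2; rw [PySem.List.index?_cons_self]; simp
      · rw [PySem.List.index?_cons_of_ne _ (Ne.symm h2), if_neg h2]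
        by_cases h3 : e = "srv3"
        · subst h3; rw [PySem.List.index?_cons_self]; simp
        · rw [PySem.List.index?_cons_of_ne _ (Ne.symm h3), if_neg h3]
          by_cases h4 : e = "srv2"
          · subst h4; rw [PySem.List.index?_cons_self]; simp
          · rw [PySem.List.index?_cons_of_ne _ (Ne.symm h4), if_neg h4]
            by_cases h5 : e = "srv1"
            · subst h5; rw [PySem.List.index?_cons_self]; simp
            · rw [PySem.List.index?_cons_of_ne _ (Ne.symm h5), if_neg h5]
              simp

theorem mrk_nil (r : Nat) : mrk r [] = r := rfl

theorem mrk_cons (r : Nat) (f : List (String × String)) (fs : List (List (String × String))) :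
    mrk r (f :: fs) = mrk (min r (rk f)) fs := rfl

theorem mrk_le_init : ∀ (fs : List (List (String × String))) (r : Nat), mrk r fs ≤ r := by
  intro fs
  induction fs with
  | nil => intro r; exact le_refl r
  | cons a fs ih => intro r; exact Nat.le_trans (ih _) (Nat.min_le_left _ _)

theorem mrk_le_mem : ∀ (fs : List (List (String × String))) (r : Nat) (f : List (String × String)),
    f ∈ fs → mrk r fs ≤ rk f := by
  intro fs
  induction fs with
  | nil => intro r f h; cases h
  | cons a fs ih =>
    intro r f h
    rcases List.mem_cons.mp h with h | h
    · subst h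
      exact Nat.le_trans (mrk_le_init fs (min r (rk f))) (Nat.min_le_right r (rk f))
    · exact ih _ _ h

theorem attain : ∀ (fs : List (List (String × String))) (r : Nat), mrk r fs < r →
    ∃ g, fs.find? (fun f => rk f == mrk r fs) = some g := by
  intro fs
  induction fs with
  | nil => intro r h; rw [mrk_nil] at h; omega
  | cons a fs ih =>
    intro r h
    rw [mrk_cons] at h ⊢
    set M := mrk (min r (rk a)) fs with hM
    by_cases hm : rk a = M
    · exact ⟨a, List.find?_cons_of_pos (by simp [hm])⟩
    · have hle : M ≤ min r (rk a) := mrk_le_init fs (min r (rk a))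
      have hlt : M < min r (rk a) := by
        rcases Nat.eq_or_lt_of_le hle with heq | h'
        · exfalso
          rcases min_choice r (rk a) with hc | hc <;> rw [hc] at heq
          · omega
          · exact hm heq.symm
        · exact h'
      obtain ⟨g, hg⟩ := ih (min r (rk a)) hlt
      refine ⟨g, ?_⟩
      rw [List.find?_cons_of_neg (by simp [hm]), hM]
      exact hg

theorem pickB_loop_cons (f : List (String × String)) (rest : List (List (String × String)))
    (best : Option (List (String × String))) (bestRank : Nat) :
    pickB_loop (f :: rest) best bestRank =
      if ((pyGetKey f "url").getD "") == "" then pickB_loop rest best bestRank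
      else
        if (PySem.List.index? ["vtt", "srt", "ttml", "srv3", "srv2", "srv1"]
              (PySem.Str.lower ((pyGetKey f "ext").getD ""))).getD 6 < bestRank then
          pickB_loop rest (some f)
            ((PySem.List.index? ["vtt", "srt", "ttml", "srv3", "srv2", "srv1"]
              (PySem.Str.lower ((pyGetKey f "ext").getD ""))).getD 6)
        else pickB_loop rest best bestRank := rfl

theorem loop_spec : ∀ (fs : List (List (String × String))) (best : Option (List (String × String))) (r : Nat),
    r ≤ 7 →
    pickB_loop fs best r =
      if mrk r fs < r then (fs.find? (fun f => rk f == mrk r fs)).or best else best := by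
  intro fs
  induction fs with
  | nil => intro best r _; simp [pickB_loop, mrk_nil]
  | cons a fs ih =>
    intro best r hr
    by_cases hu : (pyGetKey a "url").getD "" = ""
    · have hrk : rk a = 7 := by unfold rk; rw [if_pos hu]
      have hmin : min r (rk a) = r := by rw [hrk]; omega
      have hstep : pickB_loop (a :: fs) best r = pickB_loop fs best r := by
        rw [pickB_loop_cons, if_pos (by simp [hu])]
      rw [hstep, ih best r hr, mrk_cons, hmin]
      by_cases hlt : mrk r fs < r
      · rw [if_pos hlt, if_pos hlt,
          List.find?_cons_of_neg (p := fun f => rk f == mrk r fs)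
            (by have h1 := mrk_le_init fs r; simp [hrk]; omega)]
      · rw [if_neg hlt, if_neg hlt]
    · have hrkv : ((PySem.List.index? ["vtt", "srt", "ttml", "srv3", "srv2", "srv1"]
          (PySem.Str.lower ((pyGetKey a "ext").getD ""))).getD 6) = rk a := by
        rw [idxmatch, rk_of_url a hu]
      have hstep : pickB_loop (a :: fs) best r =
          if rk a < r then pickB_loop fs (some a) (rk a) else pickB_loop fs best r := by
        rw [pickB_loop_cons, if_neg (by simp [hu]), hrkv]
      rw [hstep]
      by_cases hlt : rk a < r
      · rw [if_pos hlt, ih (some a) (rk a) (rk_le_seven a), mrk_cons]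
        have hmin : min r (rk a) = rk a := by omega
        rw [hmin]
        have hle : mrk (rk a) fs ≤ rk a := mrk_le_init fs (rk a)
        have hcr : mrk (rk a) fs < r := by omega
        rw [if_pos hcr]
        by_cases hm : rk a = mrk (rk a) fs
        · have hns : ¬ (mrk (rk a) fs < rk a) := by omega
          rw [if_neg hns,
            List.find?_cons_of_pos (p := fun f => rk f == mrk (rk a) fs) (by simpa using hm),
            Option.some_or]
        · have hlt2 : mrk (rk a) fs < rk a := by omega
          rw [if_pos hlt2]
          obtain ⟨g, hg⟩ := attain fs (rk a) hlt2
          rw [List.find?_cons_of_neg (by simpa using hm), hg, Option.some_or, Option.some_or]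
      · rw [if_neg hlt, ih best r hr, mrk_cons]
        have hmin : min r (rk a) = r := by omega
        rw [hmin]
        by_cases hlt2 : mrk r fs < r
        · rw [if_pos hlt2, if_pos hlt2,
            List.find?_cons_of_neg (p := fun f => rk f == mrk r fs)
              (by simp only [beq_iff_eq]; omega)]
        · rw [if_neg hlt2, if_neg hlt2]

theorem scan_eq (e : String) : ∀ (fs : List (List (String × String))),
    pickA_scan e fs = fs.find?
      (fun f => (PySem.Str.lower ((pyGetKey f "ext").getD "") == e) && (((pyGetKey f "url").getD "") != "")) := by
  intro fs
  induction fs with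
  | nil => rfl
  | cons a fs ih =>
    by_cases h : ((PySem.Str.lower ((pyGetKey a "ext").getD "") == e) && (((pyGetKey a "url").getD "") != "")) = true
    · rw [List.find?_cons_of_pos
        (p := fun f => (PySem.Str.lower ((pyGetKey f "ext").getD "") == e) && (((pyGetKey f "url").getD "") != "")) h]
      simp only [pickA_scan]
      rw [if_pos h]
    · rw [List.find?_cons_of_neg
        (p := fun f => (PySem.Str.lower ((pyGetKey f "ext").getD "") == e) && (((pyGetKey f "url").getD "") != ""))
        (by simpa using h)]
      simp only [pickA_scan]
      rw [if_neg h, ih]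

theorem fallback_eq : ∀ (fs : List (List (String × String))),
    pickA_fallback fs = fs.find? (fun f => ((pyGetKey f "url").getD "") != "") := by
  intro fs
  induction fs with
  | nil => rfl
  | cons a fs ih =>
    by_cases h : (((pyGetKey a "url").getD "") != "") = true
    · rw [List.find?_cons_of_pos (p := fun f => ((pyGetKey f "url").getD "") != "") h]
      simp only [pickA_fallback]
      rw [if_pos h]
    · rw [List.find?_cons_of_neg (p := fun f => ((pyGetKey f "url").getD "") != "") (by simpa using h)]
      simp only [pickA_fallback]
      rw [if_neg h, ih]

theorem find?_congr' {α : Type} (l : List α) (p q : α → Bool) (h : ∀ x ∈ l, p x = q x) :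
    l.find? p = l.find? q := by
  induction l with
  | nil => rfl
  | cons a l ih =>
    by_cases ha : p a = true
    · rw [List.find?_cons_of_pos ha, List.find?_cons_of_pos ((h a List.mem_cons_self) ▸ ha)]
    · rw [List.find?_cons_of_neg (by simpa using ha),
        List.find?_cons_of_neg (by rw [← h a List.mem_cons_self]; simpa using ha)]
      exact ih (fun x hx => h x (List.mem_cons_of_mem a hx))

theorem pred_eq (s : String) (i : Nat) (hs : erk s = i) (hi : i < 6)
    (huniq : ∀ e, erk e = i → e = s) (f : List (String × String)) :
    ((PySem.Str.lower ((pyGetKey f "ext").getD "") == s) && (((pyGetKey f "url").getD "") != ""))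
      = (rk f == i) := by
  by_cases hu : (pyGetKey f "url").getD "" = ""
  · have hrk : rk f = 7 := by unfold rk; rw [if_pos hu]
    simp [hu, hrk]; omega
  · rw [rk_of_url f hu]
    have : (((pyGetKey f "url").getD "") != "") = true := by simpa using hu
    rw [this, Bool.and_true]
    by_cases he : PySem.Str.lower ((pyGetKey f "ext").getD "") = s
    · rw [he]; simp [hs]
    · have hne : erk (PySem.Str.lower ((pyGetKey f "ext").getD "")) ≠ i :=
        fun h => he (huniq _ h)
      simp [he, hne]

theorem pred_eq_fun (s : String) (i : Nat) (hs : erk s = i) (hi : i < 6)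
    (huniq : ∀ e, erk e = i → e = s) :
    (fun f => (PySem.Str.lower ((pyGetKey f "ext").getD "") == s) && (((pyGetKey f "url").getD "") != ""))
      = (fun f : List (String × String) => rk f == i) :=
  funext (pred_eq s i hs hi huniq)

theorem erk_uniq0 : ∀ e, erk e = 0 → e = "vtt" := by
  intro e h; unfold erk at h; split_ifs at h <;> first | assumption | omega
theorem erk_uniq1 : ∀ e, erk e = 1 → e = "srt" := by
  intro e h; unfold erk at h; split_ifs at h <;> first | assumption | omega
theorem erk_uniq2 : ∀ e, erk e = 2 → e = "ttml" := by
  intro e h; unfold erk at h; split_ifs at h <;> first | assumption | omega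
theorem erk_uniq3 : ∀ e, erk e = 3 → e = "srv3" := by
  intro e h; unfold erk at h; split_ifs at h <;> first | assumption | omega
theorem erk_uniq4 : ∀ e, erk e = 4 → e = "srv2" := by
  intro e h; unfold erk at h; split_ifs at h <;> first | assumption | omega
theorem erk_uniq5 : ∀ e, erk e = 5 → e = "srv1" := by
  intro e h; unfold erk at h; split_ifs at h <;> first | assumption | omega

-- A as a chain of find?s over rank predicates
theorem A_chain (fs : List (List (String × String))) (h : ¬ fs.isEmpty) :
    pick_subtitle_format_py fs =
      match fs.find? (fun f => rk f == 0) with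
      | some f => some f
      | none => match fs.find? (fun f => rk f == 1) with
        | some f => some f
        | none => match fs.find? (fun f => rk f == 2) with
          | some f => some f
          | none => match fs.find? (fun f => rk f == 3) with
            | some f => some f
            | none => match fs.find? (fun f => rk f == 4) with
              | some f => some f
              | none => match fs.find? (fun f => rk f == 5) with
                | some f => some f
                | none => fs.find? (fun f => ((pyGetKey f "url").getD "") != "") := by
  unfold pick_subtitle_format_py
  rw [if_neg h]
  simp only [pickA_exts, scan_eq, fallback_eq,
    pred_eq_fun "vtt" 0 rfl (by omega) erk_uniq0,
    pred_eq_fun "srt" 1 rfl (by omega) erk_uniq1,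
    pred_eq_fun "ttml" 2 rfl (by omega) erk_uniq2,
    pred_eq_fun "srv3" 3 rfl (by omega) erk_uniq3,
    pred_eq_fun "srv2" 4 rfl (by omega) erk_uniq4,
    pred_eq_fun "srv1" 5 rfl (by omega) erk_uniq5]
  cases h0 : fs.find? (fun f => rk f == 0)
  case some g => rfl
  cases h1 : fs.find? (fun f => rk f == 1)
  case some g => rfl
  cases h2 : fs.find? (fun f => rk f == 2)
  case some g => rfl
  cases h3 : fs.find? (fun f => rk f == 3)
  case some g => rfl
  cases h4 : fs.find? (fun f => rk f == 4)
  case some g => rfl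
  cases h5 : fs.find? (fun f => rk f == 5)
  case some g => rfl
  rfl

theorem main_eq (fs : List (List (String × String))) :
    pick_subtitle_format_py fs = pick_subtitle_format_py_alt fs := by
  have hB : pick_subtitle_format_py_alt fs =
      if mrk 7 fs < 7 then (fs.find? (fun f => rk f == mrk 7 fs)).or none else none := by
    unfold pick_subtitle_format_py_alt
    exact loop_spec fs none 7 (le_refl 7)
  by_cases hnil : fs.isEmpty
  · have : fs = [] := List.isEmpty_iff.mp hnil
    subst this
    rw [hB]; simp [pick_subtitle_format_py, mrk_nil]
  · rw [A_chain fs hnil, hB]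
    have hmem : ∀ f ∈ fs, mrk 7 fs ≤ rk f := fun f hf => mrk_le_mem fs 7 f hf
    have hle7 : mrk 7 fs ≤ 7 := mrk_le_init fs 7
    have hnone : ∀ i : Nat, i < mrk 7 fs → fs.find? (fun f => rk f == i) = none := by
      intro i hi
      rw [List.find?_eq_none]
      intro f hf
      have := hmem f hf
      simp; omega
    set m := mrk 7 fs with hm
    interval_cases m
    · obtain ⟨g, hg⟩ := attain fs 7 (by omega)
      rw [← hm] at hg
      rw [hg]; simp
    · obtain ⟨g, hg⟩ := attain fs 7 (by omega)
      rw [← hm] at hg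
      rw [hnone 0 (by omega), hg]; simp
    · obtain ⟨g, hg⟩ := attain fs 7 (by omega)
      rw [← hm] at hg
      rw [hnone 0 (by omega), hnone 1 (by omega), hg]; simp
    · obtain ⟨g, hg⟩ := attain fs 7 (by omega)
      rw [← hm] at hg
      rw [hnone 0 (by omega), hnone 1 (by omega), hnone 2 (by omega), hg]; simp
    · obtain ⟨g, hg⟩ := attain fs 7 (by omega)
      rw [← hm] at hg
      rw [hnone 0 (by omega), hnone 1 (by omega), hnone 2 (by omega), hnone 3 (by omega), hg]; simp
    · obtain ⟨g, hg⟩ := attain fs 7 (by omega)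
      rw [← hm] at hg
      rw [hnone 0 (by omega), hnone 1 (by omega), hnone 2 (by omega), hnone 3 (by omega),
        hnone 4 (by omega), hg]; simp
    · -- m = 6 : fallback
      have hcong : fs.find? (fun f => ((pyGetKey f "url").getD "") != "")
          = fs.find? (fun f => rk f == 6) := by
        apply find?_congr'
        intro f hf
        by_cases hu : (pyGetKey f "url").getD "" = ""
        · have hrk : rk f = 7 := by unfold rk; rw [if_pos hu]
          simp [hu, hrk]
        · have h1 : rk f ≤ 6 := rk_le_six_of_url f hu
          have h2 : 6 ≤ rk f := hmem f hf
          have hrk : rk f = 6 := by omega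
          simp [hu, hrk]
      obtain ⟨g, hg⟩ := attain fs 7 (by omega)
      rw [← hm] at hg
      rw [hnone 0 (by omega), hnone 1 (by omega), hnone 2 (by omega), hnone 3 (by omega),
        hnone 4 (by omega), hnone 5 (by omega), hcong, hg]; simp
    · -- m = 7 : nothing has a url
      have hfall : fs.find? (fun f => ((pyGetKey f "url").getD "") != "") = none := by
        rw [List.find?_eq_none]
        intro f hf
        by_cases hu : (pyGetKey f "url").getD "" = ""
        · simp [hu]
        · have h1 : rk f ≤ 6 := rk_le_six_of_url f hu
          have h2 : 7 ≤ rk f := hmem f hf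
          omega
      rw [hnone 0 (by omega), hnone 1 (by omega), hnone 2 (by omega), hnone 3 (by omega),
        hnone 4 (by omega), hnone 5 (by omega), hfall]; simp

-- ===== VERDICT (by name: the statement is the Claim_ definition above) =====
theorem pick_subtitle_format_py_spec : Claim_equal_pick_subtitle_format_py := by
  intro formats _
  unfold Spec_pick_subtitle_format_py
  exact main_eq formats
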